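-- pv_equiv track=rewrite | github.com/61crossroad/algorithm | PySolver/remove_duplicate_letters.py | stacky
-- ===== SOURCE A (Python) =====
-- import collections
--
-- def stacky(s: str) -> str:
--     counter, seen, stack = collections.Counter(s), set(), []
--
--     for char in s:
--         counter[char] -= 1
--         if char in seen:
--             continue
--
--         while stack and char < stack[-1] and counter[stack[-1]] > 0:
--             seen.remove(stack.pop())
--         stack.append(char)
--         seen.add(char)
--
--     return ''.join(stack)
-- ===== SOURCE B (Python) =====
-- def stacky(s: str) -> str:
--     # Greedy head selection: pick the first minimal char at or before the first
--     # "must take" position (a char whose last occurrence is here), then recurse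
--     # on the remainder with the chosen char removed.
--     if not s:
--         return ''
--     last = {ch: i for i, ch in enumerate(s)}
--     pos, mc = 0, s[0]
--     for i, ch in enumerate(s):
--         if ch < mc:
--             pos, mc = i, ch
--         if last[ch] == i:
--             break
--     rest = ''.join(x for x in s[pos + 1:] if x != mc)
--     return mc + stacky(rest)
-- ===== Notes on version B (the rewrite author's own statement) =====
-- stated objective: alternative
-- what changed: A's single-pass monotonic stack (Counter + seen-set + pop loop) is replaced by a greedy head-selection recursion: build a last-occurrence dict, scan to the first index that is its char's last occurrence, emit the smallest char seen up to there, and recurse on the remaining suffix with that char removed.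
import Mathlib
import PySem

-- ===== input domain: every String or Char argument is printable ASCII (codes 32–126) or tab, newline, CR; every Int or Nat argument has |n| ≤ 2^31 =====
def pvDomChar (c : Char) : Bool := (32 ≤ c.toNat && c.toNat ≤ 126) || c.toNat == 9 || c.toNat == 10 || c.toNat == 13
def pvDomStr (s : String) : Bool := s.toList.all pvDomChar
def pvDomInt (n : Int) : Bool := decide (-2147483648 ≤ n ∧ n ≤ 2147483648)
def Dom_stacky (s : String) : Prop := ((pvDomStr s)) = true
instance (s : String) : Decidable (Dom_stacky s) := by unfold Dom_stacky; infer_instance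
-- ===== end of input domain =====

-- B replaces A's one-pass monotonic stack by a greedy head-selection recursion
-- (pick the first minimal char up to the first non-reoccurring one, recurse on the
-- stripped remainder); objective: alternative (not faster).

-- ===== PORT A =====
-- The Python stack has its top at the END; here the stack list keeps its top at the
-- HEAD, so `stack.append`/`stack[-1]`/`stack.pop` become cons/head/tail and the final
-- ''.join(stack) is `String.ofList stack.reverse`.
-- `seen.remove(x)` is ported as Set.discard: the loop keeps seen = elements of stack,
-- so the removed element is always present and remove never raises.
def stackyPop (counter : PySem.Dict Char Int) (seen : PySem.Set Char) (stack : List Char)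
    (ch : Char) : PySem.Set Char × List Char :=
  match stack with
  | [] => (seen, [])
  | top :: rest =>
    if ch < top ∧ counter.getD top 0 > 0 then
      stackyPop counter (PySem.Set.discard seen top) rest ch
    else (seen, top :: rest)

def stackyLoop (l : List Char) (counter : PySem.Dict Char Int) (seen : PySem.Set Char)
    (stack : List Char) : List Char :=
  match l with
  | [] => stack
  | ch :: rest =>
    let counter := counter.modify ch 0 (· - 1)
    if PySem.Set.contains seen ch then stackyLoop rest counter seen stack
    else
      let p := stackyPop counter seen stack ch
      stackyLoop rest counter (PySem.Set.add p.1 ch) (ch :: p.2)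

def stacky (s : String) : String :=
  String.ofList ((stackyLoop s.toList (PySem.Dict.counter s.toList) PySem.Set.empty []).reverse)

-- ===== PORT B =====
-- last = {ch: i for i, ch in enumerate(s)} of Source B
def stackyLast (l : List Char) : PySem.Dict Char Int :=
  (PySem.List.enumerate l 0).foldl (fun d p => d.insert p.2 p.1) PySem.Dict.empty

-- the for/enumerate scan of Source B: i is the current index, (pos, mc) the position and
-- value of the smallest char so far; breaks when last[ch] == i. The getD default -1
-- is never consulted: every scanned char is a key of `last`.
def stackyScan (l : List Char) (last : PySem.Dict Char Int) (i : Nat) (pos : Nat)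
    (mc : Char) : Nat × Char :=
  match l with
  | [] => (pos, mc)
  | ch :: rest =>
    let p := if ch < mc then (i, ch) else (pos, mc)
    if last.getD ch (-1) == (i : Int) then p else stackyScan rest last (i + 1) p.1 p.2

def stackyAltList (l : List Char) : List Char :=
  match h : l with
  | [] => []
  | a :: t =>
    let p := stackyScan l (stackyLast l) 0 0 a
    p.2 :: stackyAltList ((l.drop (p.1 + 1)).filter (fun x => x ≠ p.2))
termination_by l.length
decreasing_by
  subst h
  refine lt_of_le_of_lt (List.length_filter_le _ _) ?_
  rw [List.length_drop]
  simp only [List.length_cons]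
  omega

def stacky_alt (s : String) : String := String.ofList (stackyAltList s.toList)

-- ===== PRECONDITION & SPEC =====
def Spec_stacky (s : String) (out : String) : Prop := out = stacky_alt s
instance (s : String) (out : String) : Decidable (Spec_stacky s out) := by unfold Spec_stacky; infer_instance

-- ===== CLAIM (what is proved, stated in full; the proofs are below) =====
def Claim_equal_stacky : Prop := ∀ (s : String), Dom_stacky s → Spec_stacky s (stacky s)

-- ===== LEMMAS AND PROOFS =====

-- ---- an abstract model of A's loop, stripped of the Dict/Set bookkeeping ----
-- mPop x r st: pop the stack st (top at head) while the top t satisfies x < t and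
-- t still occurs in the remaining input r (= "counter[t] > 0" after the decrement).
def mPop (x : Char) (r : List Char) : List Char → List Char
  | [] => []
  | t :: st => if x < t ∧ t ∈ r then mPop x r st else t :: st

def mLoop : List Char → List Char → List Char
  | [], st => st
  | x :: r, st => if x ∈ st then mLoop r st else mLoop r (x :: mPop x r st)

-- ---- the quantities B's scan computes ----
-- brkL l: index of the first char with no later copy (scan stop position)
def brkL : List Char → Nat
  | [] => 0
  | x :: r => if x ∈ r then brkL r + 1 else 0

-- minTake l: smallest char among l[0..brkL l]; posFirst l: its first index
def minTake : List Char → Char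
  | [] => default
  | x :: r => if x ∈ r then (if x ≤ minTake r then x else minTake r) else x

def posFirst : List Char → Nat
  | [] => 0
  | x :: r => if x ∈ r then (if x ≤ minTake r then 0 else posFirst r + 1) else 0

-- ---- facts about mPop ----
theorem mPop_subset {x : Char} {r st : List Char} {y : Char} (h : y ∈ mPop x r st) : y ∈ st := by
  induction st with
  | nil => simp [mPop] at h
  | cons t st ih =>
    simp only [mPop] at h
    split at h
    · exact List.mem_cons_of_mem _ (ih h)
    · exact h

theorem mPop_all {x : Char} {r st : List Char} (h : ∀ t ∈ st, x < t ∧ t ∈ r) :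
    mPop x r st = [] := by
  induction st with
  | nil => rfl
  | cons t st ih =>
    have ht := h t (List.mem_cons_self ..)
    simp only [mPop, if_pos ht]
    exact ih fun t' ht' => h t' (List.mem_cons_of_mem _ ht')

theorem mPop_keep {x z : Char} {r st : List Char} (hz : z ∈ st) (hr : z ∉ r) :
    z ∈ mPop x r st := by
  induction st with
  | nil => cases hz
  | cons t st ih =>
    simp only [mPop]
    split
    · rename_i hcond
      rcases List.mem_cons.1 hz with rfl | hz'
      · exact absurd hcond.2 hr
      · exact ih hz'
    · exact hz

theorem mPop_bisim {c x : Char} {r st : List Char} (hc : c ∉ st)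
    (h : ¬ x < c ∨ c ∉ r ∨ ∃ z ∈ st, z ∉ r) :
    mPop x r (st ++ [c]) = mPop x (r.filter (fun y => y ≠ c)) st ++ [c] := by
  induction st with
  | nil =>
    have hcond : ¬ (x < c ∧ c ∈ r) := by
      rcases h with h | h | h
      · exact fun hh => h hh.1
      · exact fun hh => h hh.2
      · rcases h with ⟨z, hz, _⟩; cases hz
    simp [mPop, hcond]
  | cons t st ih =>
    have htc : t ≠ c := fun he => hc (he ▸ List.mem_cons_self ..)
    have hmem : (t ∈ r) ↔ t ∈ r.filter (fun y => y ≠ c) := by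
      simp [List.mem_filter, htc]
    simp only [List.cons_append, mPop]
    by_cases hcond : x < t ∧ t ∈ r
    · rw [if_pos hcond, if_pos ⟨hcond.1, hmem.1 hcond.2⟩]
      refine ih (fun hm => hc (List.mem_cons_of_mem _ hm)) ?_
      rcases h with h | h | h
      · exact Or.inl h
      · exact Or.inr (Or.inl h)
      · rcases h with ⟨z, hz, hzr⟩
        rcases List.mem_cons.1 hz with rfl | hz'
        · exact absurd hcond.2 hzr
        · exact Or.inr (Or.inr ⟨z, hz', hzr⟩)
    · rw [if_neg hcond, if_neg (fun hh => hcond ⟨hh.1, hmem.2 hh.2⟩)]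
      simp

-- ---- decomposing mLoop over an input split ----
def mAfter : List Char → List Char → List Char → List Char
  | [], _, st => st
  | x :: r1, l2, st => mAfter r1 l2 (if x ∈ st then st else x :: mPop x (r1 ++ l2) st)

theorem mLoop_append (l1 l2 st : List Char) :
    mLoop (l1 ++ l2) st = mLoop l2 (mAfter l1 l2 st) := by
  induction l1 generalizing st with
  | nil => rfl
  | cons x r1 ih =>
    simp only [List.cons_append, mLoop, mAfter]
    split
    · exact ih _
    · exact ih _

theorem mAfter_subset {l1 l2 st : List Char} {y : Char} (h : y ∈ mAfter l1 l2 st) :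
    y ∈ st ∨ y ∈ l1 := by
  induction l1 generalizing st with
  | nil => exact Or.inl h
  | cons x r1 ih =>
    rcases ih h with hy | hy
    · split at hy
      · exact Or.inl hy
      · rcases List.mem_cons.1 hy with rfl | hy'
        · exact Or.inr (List.mem_cons_self ..)
        · exact Or.inl (mPop_subset hy')
    · exact Or.inr (List.mem_cons_of_mem _ hy)

-- ---- facts about brkL / minTake / posFirst ----
theorem brkL_lt {l : List Char} (h : l ≠ []) : brkL l < l.length := by
  induction l with
  | nil => exact absurd rfl h
  | cons x r ih =>
    simp only [brkL, List.length_cons]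
    split
    · rename_i hx
      have := ih (List.ne_nil_of_mem hx)
      omega
    · omega

theorem brkL_not_mem_drop {l : List Char} (h : l ≠ []) :
    l[brkL l]'(brkL_lt h) ∉ l.drop (brkL l + 1) := by
  induction l with
  | nil => exact absurd rfl h
  | cons x r ih =>
    by_cases hx : x ∈ r
    · have hr : r ≠ [] := List.ne_nil_of_mem hx
      simp only [brkL, if_pos hx, List.getElem_cons_succ, List.drop_succ_cons]
      exact ih hr
    · simp only [brkL, if_neg hx, List.getElem_cons_zero, List.drop_succ_cons, List.drop_zero]
      exact hx

theorem mem_drop_of_lt_brkL {l : List Char} {j : Nat} (hj : j < brkL l)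
    (hl : j < l.length) : l[j] ∈ l.drop (j + 1) := by
  induction l generalizing j with
  | nil => cases hl
  | cons x r ih =>
    by_cases hx : x ∈ r
    · cases j with
      | zero => simpa using hx
      | succ j =>
        simp only [brkL, if_pos hx] at hj
        simp only [List.getElem_cons_succ, List.drop_succ_cons]
        exact ih (by omega) (by simpa using hl)
    · simp [brkL, if_neg hx] at hj

theorem posFirst_le_brkL (l : List Char) : posFirst l ≤ brkL l := by
  induction l with
  | nil => simp [posFirst, brkL]
  | cons x r ih =>
    simp only [posFirst, brkL]
    split
    all_goals try split
    all_goals omega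

theorem posFirst_lt {l : List Char} (h : l ≠ []) : posFirst l < l.length :=
  lt_of_le_of_lt (posFirst_le_brkL l) (brkL_lt h)

theorem getElem_posFirst {l : List Char} (h : l ≠ []) :
    l[posFirst l]'(posFirst_lt h) = minTake l := by
  induction l with
  | nil => exact absurd rfl h
  | cons x r ih =>
    by_cases hx : x ∈ r
    · by_cases hm : x ≤ minTake r
      · simp [posFirst, minTake, hx, hm]
      · have hr : r ≠ [] := List.ne_nil_of_mem hx
        simp only [posFirst, minTake, if_pos hx, if_neg hm, List.getElem_cons_succ]
        exact ih hr
    · simp [posFirst, minTake, hx]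

theorem minTake_lt_of_lt_posFirst {l : List Char} {k : Nat} (hk : k < posFirst l)
    (hl : k < l.length) : minTake l < l[k] := by
  induction l generalizing k with
  | nil => cases hl
  | cons x r ih =>
    by_cases hx : x ∈ r
    · by_cases hm : x ≤ minTake r
      · simp [posFirst, hx, hm] at hk
      · simp only [posFirst, if_pos hx, if_neg hm] at hk
        simp only [minTake, if_pos hx, if_neg hm]
        cases k with
        | zero => simp only [List.getElem_cons_zero]; exact lt_of_not_ge hm
        | succ k =>
          simp only [List.getElem_cons_succ]
          exact ih (by omega) (by simpa using hl)
    · simp [posFirst, hx] at hk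

theorem minTake_le_of_le_brkL {l : List Char} {k : Nat} (hk : k ≤ brkL l)
    (hl : k < l.length) : minTake l ≤ l[k] := by
  induction l generalizing k with
  | nil => cases hl
  | cons x r ih =>
    by_cases hx : x ∈ r
    · have hr : r ≠ [] := List.ne_nil_of_mem hx
      simp only [brkL, if_pos hx] at hk
      cases k with
      | zero =>
        simp only [List.getElem_cons_zero, minTake, if_pos hx]
        split
        · exact le_refl x
        · rename_i hm; exact le_of_lt (lt_of_not_ge hm)
      | succ k =>
        simp only [List.getElem_cons_succ, minTake, if_pos hx]
        have hkr : k < r.length := by simpa using hl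
        have hrk : minTake r ≤ r[k] := ih (by omega) hkr
        split
        · rename_i hm; exact le_trans hm hrk
        · exact hrk
    · simp only [brkL, if_neg hx] at hk
      have : k = 0 := by omega
      subst this
      simp [minTake, hx]

-- every element has a last occurrence
theorem last_occ {x : Char} {l : List Char} (h : x ∈ l) :
    ∃ m, ∃ hm : m < l.length, l[m] = x ∧ x ∉ l.drop (m + 1) := by
  induction l with
  | nil => cases h
  | cons a r ih =>
    by_cases hx : x ∈ r
    · obtain ⟨m, hm, hget, hnot⟩ := ih hx
      exact ⟨m + 1, by simpa using hm, by simpa using hget, by simpa using hnot⟩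
    · have hax : a = x := by
        rcases List.mem_cons.1 h with he | he
        · exact he.symm
        · exact absurd he hx
      exact ⟨0, by simp, by simpa using hax, by simpa using hx⟩

-- ---- the bisimulation: a fixed bottom element c is inert ----
def PopInv (c : Char) (u X : List Char) : Prop :=
  c ∉ X ∧ (c ∉ u ∨ (∃ z ∈ X, z ∉ u) ∨
    ∃ j, ∃ hj : j < u.length, u[j] ∉ u.drop (j + 1) ∧
      ∀ k, (hk : k < u.length) → k ≤ j → ¬ u[k] < c)

-- the tail of branch 3 of PopInv: either the head is the break char, or shift j
theorem popinv_tail_disj {c x : Char} {r : List Char}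
    (hd : ∃ j, ∃ hj : j < (x :: r).length, (x :: r)[j] ∉ (x :: r).drop (j + 1) ∧
      ∀ k, (hk : k < (x :: r).length) → k ≤ j → ¬ (x :: r)[k] < c) :
    (x ∉ r ∧ ¬ x < c) ∨
      (∃ j, ∃ hj : j < r.length, r[j] ∉ r.drop (j + 1) ∧
        ∀ k, (hk : k < r.length) → k ≤ j → ¬ r[k] < c) := by
  obtain ⟨j, hj, hnd, hall⟩ := hd
  cases j with
  | zero =>
    refine Or.inl ⟨by simpa using hnd, ?_⟩
    simpa using hall 0 (by simp) (le_refl 0)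
  | succ j =>
    refine Or.inr ⟨j, by simpa using hj, by simpa using hnd, ?_⟩
    intro k hk hkj
    simpa using hall (k + 1) (by simpa using Nat.succ_lt_succ hk) (Nat.succ_le_succ hkj)

theorem popinv_head_not_lt {c x : Char} {r : List Char}
    (hd : ∃ j, ∃ hj : j < (x :: r).length, (x :: r)[j] ∉ (x :: r).drop (j + 1) ∧
      ∀ k, (hk : k < (x :: r).length) → k ≤ j → ¬ (x :: r)[k] < c) :
    ¬ x < c := by
  obtain ⟨j, hj, _, hall⟩ := hd
  simpa using hall 0 (by simp) (Nat.zero_le j)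

theorem mLoop_bisim {c : Char} {u X : List Char} (h : PopInv c u X) :
    mLoop u (X ++ [c]) = mLoop (u.filter (fun y => y ≠ c)) X ++ [c] := by
  induction u generalizing X with
  | nil => simp [mLoop]
  | cons x r ih =>
    obtain ⟨hcX, hdisj⟩ := h
    by_cases hxc : x = c
    · subst hxc
      have h1 : mLoop (x :: r) (X ++ [x]) = mLoop r (X ++ [x]) := by
        simp only [mLoop]
        rw [if_pos (by simp)]
      have h2 : (x :: r).filter (fun y => y ≠ x) = r.filter (fun y => y ≠ x) := by
        simp
      rw [h1, h2]
      apply ih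
      refine ⟨hcX, ?_⟩
      rcases hdisj with h1' | h2' | h3'
      · exact absurd (List.mem_cons_self ..) h1'
      · obtain ⟨z, hz, hzr⟩ := h2'
        exact Or.inr (Or.inl ⟨z, hz, fun hm => hzr (List.mem_cons_of_mem _ hm)⟩)
      · rcases popinv_tail_disj h3' with ⟨hxr, _⟩ | h3''
        · exact Or.inl hxr
        · exact Or.inr (Or.inr h3'')
    · have hfc : (x :: r).filter (fun y => y ≠ c) = x :: r.filter (fun y => y ≠ c) := by
        simp [hxc]
      rw [hfc]
      by_cases hxX : x ∈ X
      · have h1 : mLoop (x :: r) (X ++ [c]) = mLoop r (X ++ [c]) := by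
          simp only [mLoop]
          rw [if_pos (List.mem_append_left _ hxX)]
        have h2 : mLoop (x :: r.filter (fun y => y ≠ c)) X = mLoop (r.filter (fun y => y ≠ c)) X := by
          simp only [mLoop]
          rw [if_pos hxX]
        rw [h1, h2]
        apply ih
        refine ⟨hcX, ?_⟩
        rcases hdisj with h1' | h2' | h3'
        · exact Or.inl fun hm => h1' (List.mem_cons_of_mem _ hm)
        · obtain ⟨z, hz, hzr⟩ := h2'
          exact Or.inr (Or.inl ⟨z, hz, fun hm => hzr (List.mem_cons_of_mem _ hm)⟩)
        · rcases popinv_tail_disj h3' with ⟨hxr, _⟩ | h3''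
          · exact Or.inr (Or.inl ⟨x, hxX, hxr⟩)
          · exact Or.inr (Or.inr h3'')
      · have hxXc : x ∉ X ++ [c] := by simp [hxc, hxX]
        have hside : ¬ x < c ∨ c ∉ r ∨ ∃ z ∈ X, z ∉ r := by
          rcases hdisj with h1' | h2' | h3'
          · exact Or.inr (Or.inl fun hm => h1' (List.mem_cons_of_mem _ hm))
          · obtain ⟨z, hz, hzr⟩ := h2'
            exact Or.inr (Or.inr ⟨z, hz, fun hm => hzr (List.mem_cons_of_mem _ hm)⟩)
          · exact Or.inl (popinv_head_not_lt h3')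
        have hmb : mPop x r (X ++ [c]) = mPop x (r.filter (fun y => y ≠ c)) X ++ [c] :=
          mPop_bisim hcX hside
        have h1 : mLoop (x :: r) (X ++ [c])
            = mLoop r ((x :: mPop x (r.filter (fun y => y ≠ c)) X) ++ [c]) := by
          simp only [mLoop]
          rw [if_neg hxXc, hmb]
          rfl
        have h2 : mLoop (x :: r.filter (fun y => y ≠ c)) X
            = mLoop (r.filter (fun y => y ≠ c)) (x :: mPop x (r.filter (fun y => y ≠ c)) X) := by
          simp only [mLoop]
          rw [if_neg hxX]
        rw [h1, h2]
        apply ih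
        constructor
        · intro hm
          rcases List.mem_cons.1 hm with he | hm'
          · exact hxc he.symm
          · exact hcX (mPop_subset hm')
        · rcases hdisj with h1' | h2' | h3'
          · exact Or.inl fun hm => h1' (List.mem_cons_of_mem _ hm)
          · obtain ⟨z, hz, hzr⟩ := h2'
            have hzr' : z ∉ r := fun hm => hzr (List.mem_cons_of_mem _ hm)
            have hzf : z ∉ r.filter (fun y => y ≠ c) := fun hm => hzr' (List.mem_filter.1 hm).1
            exact Or.inr (Or.inl ⟨z, List.mem_cons_of_mem _ (mPop_keep hz hzf), hzr'⟩)
          · rcases popinv_tail_disj h3' with ⟨hxr, _⟩ | h3''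
            · exact Or.inr (Or.inl ⟨x, List.mem_cons_self .., hxr⟩)
            · exact Or.inr (Or.inr h3'')

-- ---- the commit step: A's loop fixes minTake l as the next output char ----
theorem mLoop_commit {l : List Char} (h : l ≠ []) :
    mLoop l [] =
      mLoop ((l.drop (posFirst l + 1)).filter (fun y => y ≠ minTake l)) [] ++ [minTake l] := by
  have hp : posFirst l < l.length := posFirst_lt h
  have hb : brkL l < l.length := brkL_lt h
  have hpb : posFirst l ≤ brkL l := posFirst_le_brkL l
  have hsplit : l = l.take (posFirst l) ++ (minTake l :: l.drop (posFirst l + 1)) := by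
    conv_lhs => rw [← List.take_append_drop (posFirst l) l]
    rw [show l.drop (posFirst l) = l[posFirst l]'hp :: l.drop (posFirst l + 1) from
          (List.getElem_cons_drop ..).symm,
        getElem_posFirst h]
  -- the state after processing the prefix
  have hst : ∀ y ∈ mAfter (l.take (posFirst l)) (minTake l :: l.drop (posFirst l + 1)) [],
      minTake l < y ∧ y ∈ l.drop (posFirst l + 1) := by
    intro y hy
    rcases mAfter_subset hy with hy0 | hyt
    · cases hy0
    · obtain ⟨k, hk, hget⟩ := List.mem_take_iff_getElem.1 hyt
      have hk' : k < posFirst l := lt_of_lt_of_le hk (min_le_left ..)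
      have hkl : k < l.length := lt_trans hk' hp
      have hlt : minTake l < y := hget ▸ minTake_lt_of_lt_posFirst hk' hkl
      refine ⟨hlt, ?_⟩
      have hyl : y ∈ l := hget ▸ List.getElem_mem hkl
      obtain ⟨m, hm, hmy, hnot⟩ := last_occ hyl
      have hmb : brkL l ≤ m := by
        by_contra hcon
        exact hnot (hmy ▸ mem_drop_of_lt_brkL (by omega) hm)
      have hmp : m ≠ posFirst l := by
        intro he
        have hme : l[m]'hm = minTake l := (getElem_congr rfl he hm).trans (getElem_posFirst h)
        exact absurd (hme.symm.trans hmy) (ne_of_lt hlt)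
      have hmgt : posFirst l + 1 ≤ m := by omega
      rw [← hmy]
      have : (l.drop (posFirst l + 1)).length = l.length - (posFirst l + 1) := List.length_drop ..
      refine List.mem_iff_getElem.2 ⟨m - (posFirst l + 1), by omega, ?_⟩
      rw [List.getElem_drop]
      congr 1
      omega
  have hcst : minTake l ∉ mAfter (l.take (posFirst l)) (minTake l :: l.drop (posFirst l + 1)) [] := by
    intro hm
    exact absurd (hst _ hm).1 (lt_irrefl _)
  conv_lhs => rw [hsplit, mLoop_append]
  simp only [mLoop]
  rw [if_neg hcst, mPop_all (hst), show minTake l :: ([] : List Char) = [] ++ [minTake l] from rfl]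
  apply mLoop_bisim
  refine ⟨List.not_mem_nil, ?_⟩
  by_cases heq : posFirst l = brkL l
  · refine Or.inl ?_
    have h3 : minTake l = l[brkL l]'hb := (getElem_posFirst h).symm.trans (getElem_congr rfl heq hp)
    rw [h3, heq]
    exact brkL_not_mem_drop h
  · have hplt : posFirst l < brkL l := by omega
    refine Or.inr (Or.inr ⟨brkL l - (posFirst l + 1), ?_, ?_, ?_⟩)
    · rw [List.length_drop]; omega
    · rw [List.getElem_drop, List.drop_drop]
      have he1 : posFirst l + 1 + (brkL l - (posFirst l + 1)) = brkL l := by omega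
      have he2 : posFirst l + 1 + (brkL l - (posFirst l + 1) + 1) = brkL l + 1 := by omega
      rw [he2, getElem_congr rfl he1 (by omega)]
      exact brkL_not_mem_drop h
    · intro k hk hkj
      rw [List.getElem_drop]
      have hkb : posFirst l + 1 + k ≤ brkL l := by omega
      have hkl : posFirst l + 1 + k < l.length := by omega
      exact not_lt.2 (minTake_le_of_le_brkL hkb hkl)

-- ---- B's scan computes (posFirst, minTake) ----
-- the last-occurrence dict: keys not in the rest of the fold keep their value …
theorem stackyLast_fold_of_not_mem {ch : Char} {r : List Char} (h : ch ∉ r) :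
    ∀ (k : Int) (d : PySem.Dict Char Int) (v : Int),
      ((PySem.List.enumerate r k).foldl (fun d p => d.insert p.2 p.1) d).getD ch v
        = d.getD ch v := by
  induction r with
  | nil => intro k d v; simp [PySem.List.enumerate_nil]
  | cons x r ih =>
    intro k d v
    rw [PySem.List.enumerate_cons, List.foldl_cons]
    have hx : ch ∉ r := fun hm => h (List.mem_cons_of_mem _ hm)
    rw [ih hx]
    have hne : ch ≠ x := fun he => h (he ▸ List.mem_cons_self ..)
    rw [PySem.Dict.getD_insert, if_neg hne]

-- … and keys occurring in the rest end with an index ≥ the running start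
theorem stackyLast_fold_of_mem {ch : Char} {r : List Char} (h : ch ∈ r) :
    ∀ (k : Int) (d : PySem.Dict Char Int) (v : Int),
      k ≤ ((PySem.List.enumerate r k).foldl (fun d p => d.insert p.2 p.1) d).getD ch v := by
  induction r with
  | nil => cases h
  | cons x r ih =>
    intro k d v
    rw [PySem.List.enumerate_cons, List.foldl_cons]
    by_cases hx : ch ∈ r
    · exact le_trans (by omega) (ih hx (k + 1) _ v)
    · have he : ch = x := by
        rcases List.mem_cons.1 h with he | hm
        · exact he
        · exact absurd hm hx
      rw [stackyLast_fold_of_not_mem hx, he, PySem.Dict.getD_insert_self]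

theorem stackyLast_split_aux (d0 : PySem.Dict Char Int) (ch : Char) (rest : List Char)
    (i : Int) :
    (((PySem.List.enumerate rest (i + 1)).foldl (fun d p => d.insert p.2 p.1)
        (d0.insert ch i)).getD ch (-1) = i) ↔ ch ∉ rest := by
  constructor
  · intro he hm
    have hle := stackyLast_fold_of_mem hm (i + 1) (d0.insert ch i) (-1)
    rw [he] at hle
    omega
  · intro hm
    rw [stackyLast_fold_of_not_mem hm, PySem.Dict.getD_insert_self]

-- the scan's break test reads "ch has no later copy"
theorem stackyLast_split (pre : List Char) (ch : Char) (rest : List Char) :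
    ((stackyLast (pre ++ ch :: rest)).getD ch (-1) = (pre.length : Int)) ↔ ch ∉ rest := by
  unfold stackyLast
  rw [PySem.List.enumerate_append, List.foldl_append, PySem.List.enumerate_cons,
    List.foldl_cons]
  simp only [zero_add]
  exact stackyLast_split_aux _ ch rest (pre.length : Int)

theorem stackyScan_spec (u : List Char) (hu : u ≠ []) :
    ∀ (pre : List Char) (pos : Nat) (mc : Char),
    stackyScan u (stackyLast (pre ++ u)) pre.length pos mc =
      if minTake u < mc then (pre.length + posFirst u, minTake u) else (pos, mc) := by
  induction u with
  | nil => exact absurd rfl hu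
  | cons x r ih =>
    intro pre pos mc
    have hsplit := stackyLast_split pre x r
    by_cases hx : x ∈ r
    · have hr : r ≠ [] := List.ne_nil_of_mem hx
      have hbrk : ((stackyLast (pre ++ x :: r)).getD x (-1) == (pre.length : Int)) = false := by
        rw [beq_eq_false_iff_ne]
        exact fun he => (hsplit.1 he) hx
      have hstep : ∀ pos' mc', stackyScan (x :: r) (stackyLast (pre ++ x :: r)) pre.length pos' mc'
          = stackyScan r (stackyLast ((pre ++ [x]) ++ r)) (pre ++ [x]).length
              (if x < mc' then (pre.length, x) else (pos', mc')).1
              (if x < mc' then (pre.length, x) else (pos', mc')).2 := by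
        intro pos' mc'
        simp only [stackyScan, hbrk, if_false, Bool.false_eq_true]
        rw [List.append_assoc]
        simp
      by_cases hm : x ≤ minTake r
      · have hnm : ¬ minTake r < x := not_lt.2 hm
        by_cases hlt : x < mc
        · rw [hstep, ih hr, if_pos hlt]
          simp only [minTake, posFirst, if_pos hx, if_pos hm, if_pos hlt, if_neg hnm]
          simp
        · have h2 : ¬ minTake r < mc := fun hc => hlt (lt_of_le_of_lt hm hc)
          rw [hstep, ih hr, if_neg hlt]
          simp only [minTake, posFirst, if_pos hx, if_pos hm, if_neg h2]
          simp [hlt]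
      · have hmr : minTake r < x := lt_of_not_ge hm
        by_cases hlt : x < mc
        · have h4 : minTake r < mc := lt_trans hmr hlt
          rw [hstep, ih hr, if_pos hlt]
          simp only [minTake, posFirst, if_pos hx, if_neg hm, if_pos hmr, if_pos h4]
          simp
          omega
        · rw [hstep, ih hr, if_neg hlt]
          by_cases h5 : minTake r < mc
          · simp only [minTake, posFirst, if_pos hx, if_neg hm, if_pos h5]
            simp
            omega
          · simp only [minTake, posFirst, if_pos hx, if_neg hm, if_neg h5]
    · have hbrk : ((stackyLast (pre ++ x :: r)).getD x (-1) == (pre.length : Int)) = true := by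
        rw [beq_iff_eq]
        exact hsplit.2 hx
      simp only [stackyScan, hbrk, if_true, minTake, posFirst, if_neg hx]
      by_cases hlt : x < mc <;> simp [hlt]

theorem stackyScan_init {l : List Char} {a : Char} {t : List Char} (h : l = a :: t) :
    stackyScan l (stackyLast l) 0 0 a = (posFirst l, minTake l) := by
  subst h
  have hs := stackyScan_spec (a :: t) (List.cons_ne_nil a t) [] 0 a
  rw [List.nil_append] at hs
  simp only [List.length_nil, zero_add] at hs
  rw [hs]
  have hle : minTake (a :: t) ≤ a := by
    simpa using minTake_le_of_le_brkL (Nat.zero_le (brkL (a :: t))) (by simp)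
  by_cases hlt : minTake (a :: t) < a
  · rw [if_pos hlt]
  · rw [if_neg hlt]
    have heq : minTake (a :: t) = a := le_antisymm hle (not_lt.1 hlt)
    have hpz : posFirst (a :: t) = 0 := by
      by_contra hnz
      have h0 : (0 : Nat) < posFirst (a :: t) := Nat.pos_of_ne_zero hnz
      have hlt' := minTake_lt_of_lt_posFirst h0 (l := a :: t) (by simp)
      rw [List.getElem_cons_zero] at hlt'
      exact hlt hlt'
    rw [hpz, heq]

-- ---- model equivalence with B ----
theorem main_model : ∀ l : List Char, (mLoop l []).reverse = stackyAltList l := by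
  intro l
  induction hn : l.length using Nat.strong_induction_on generalizing l with
  | _ n ih =>
  subst hn
  cases l with
  | nil => simp [mLoop, stackyAltList]
  | cons a t =>
    rw [stackyAltList, stackyScan_init rfl, mLoop_commit (List.cons_ne_nil a t)]
    rw [List.reverse_append]
    have hlen : (((a :: t).drop (posFirst (a :: t) + 1)).filter
        (fun y => y ≠ minTake (a :: t))).length < (a :: t).length := by
      refine lt_of_le_of_lt (List.length_filter_le _ _) ?_
      rw [List.length_drop]
      simp only [List.length_cons]
      omega
    rw [ih _ hlen _ rfl]
    simp

-- ---- bridging A's ported loop to the model ----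
theorem mPop_suffix (x : Char) (r st : List Char) : (mPop x r st).IsSuffix st := by
  induction st with
  | nil => exact List.suffix_refl []
  | cons t st ih =>
    simp only [mPop]
    split
    · exact ih.trans (List.suffix_cons t st)
    · exact List.suffix_refl _

theorem stackyPop_bridge (ch : Char) (r : List Char) (counter : PySem.Dict Char Int)
    (hcnt : ∀ x, counter.getD x 0 = (r.count x : Int)) :
    ∀ (stack : List Char) (seen : PySem.Set Char), stack.Nodup →
      (∀ x, x ∈ seen ↔ x ∈ stack) →
      (stackyPop counter seen stack ch).2 = mPop ch r stack ∧
      (∀ x, x ∈ (stackyPop counter seen stack ch).1 ↔ x ∈ mPop ch r stack) := by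
  intro stack
  induction stack with
  | nil =>
    intro seen _ hseen
    exact ⟨rfl, fun x => hseen x⟩
  | cons top rest ih =>
    intro seen hnd hseen
    have hcond : (ch < top ∧ counter.getD top 0 > 0) ↔ (ch < top ∧ top ∈ r) := by
      rw [hcnt top]
      constructor
      · rintro ⟨h1, h2⟩
        exact ⟨h1, List.count_pos_iff.1 (by exact_mod_cast h2)⟩
      · rintro ⟨h1, h2⟩
        exact ⟨h1, by exact_mod_cast List.count_pos_iff.2 h2⟩
    by_cases hc : ch < top ∧ top ∈ r
    · have hc' : ch < top ∧ counter.getD top 0 > 0 := hcond.2 hc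
      have hseen' : ∀ x, x ∈ PySem.Set.discard seen top ↔ x ∈ rest := by
        intro x
        rw [PySem.Set.mem_discard]
        constructor
        · rintro ⟨hx, hne⟩
          rcases List.mem_cons.1 ((hseen x).1 hx) with he | hm
          · exact absurd he hne
          · exact hm
        · intro hx
          have hne : x ≠ top := fun he => (List.nodup_cons.1 hnd).1 (he ▸ hx)
          exact ⟨(hseen x).2 (List.mem_cons_of_mem _ hx), hne⟩
      have := ih (PySem.Set.discard seen top) (List.nodup_cons.1 hnd).2 hseen'
      simp only [stackyPop, mPop, if_pos hc, if_pos hc']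
      exact this
    · have hc' : ¬ (ch < top ∧ counter.getD top 0 > 0) := fun hh => hc (hcond.1 hh)
      simp only [stackyPop, mPop, if_neg hc, if_neg hc']
      refine ⟨?_, hseen⟩
      simp

theorem stackyLoop_bridge : ∀ (u : List Char) (counter : PySem.Dict Char Int)
    (seen : PySem.Set Char) (stack : List Char),
    (∀ x, counter.getD x 0 = (u.count x : Int)) →
    (∀ x, x ∈ seen ↔ x ∈ stack) → stack.Nodup →
    stackyLoop u counter seen stack = mLoop u stack := by
  intro u
  induction u with
  | nil =>
    intro counter seen stack _ _ _
    rfl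
  | cons ch rest ih =>
    intro counter seen stack hcnt hseen hnd
    have hcnt' : ∀ x, (counter.modify ch 0 (· - 1)).getD x 0 = (rest.count x : Int) := by
      intro x
      rw [PySem.Dict.getD_modify]
      by_cases hx : x = ch
      · subst hx
        rw [if_pos rfl, hcnt x, List.count_cons_self]
        push_cast
        omega
      · rw [if_neg hx, hcnt x]
        simp [Ne.symm hx]
    by_cases hmem : ch ∈ stack
    · have hcont : PySem.Set.contains seen ch = true := by
        rw [PySem.Set.contains_iff]
        exact (hseen ch).2 hmem
      simp only [stackyLoop, mLoop, hcont, if_pos hmem, if_true]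
      exact ih _ _ _ hcnt' hseen hnd
    · have hcont : ¬ PySem.Set.contains seen ch = true := by
        rw [PySem.Set.contains_iff]
        exact fun hx => hmem ((hseen ch).1 hx)
      obtain ⟨hp2, hp1⟩ := stackyPop_bridge ch rest (counter.modify ch 0 (· - 1)) hcnt'
        stack seen hnd hseen
      simp only [stackyLoop, mLoop, hcont, if_neg hmem, if_false, Bool.false_eq_true]
      rw [hp2]
      have hnd' : (ch :: mPop ch rest stack).Nodup := by
        rw [List.nodup_cons]
        exact ⟨fun hx => hmem (mPop_subset hx), ((mPop_suffix ch rest stack).sublist).nodup hnd⟩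
      refine ih _ _ _ hcnt' ?_ hnd'
      intro x
      rw [PySem.Set.mem_add, hp1 x, List.mem_cons]
      tauto

theorem bridgeA : ∀ (l : List Char),
    stackyLoop l (PySem.Dict.counter l) PySem.Set.empty [] = mLoop l [] := by
  intro l
  refine stackyLoop_bridge l _ _ _ (fun x => PySem.Dict.getD_counter ..) ?_ List.nodup_nil
  intro x
  simp [PySem.Set.empty]

-- ===== VERDICT (by name: the statement is the Claim_ definition above) =====
theorem stacky_spec : Claim_equal_stacky := by
  intro s _
  unfold Spec_stacky stacky stacky_alt
  rw [bridgeA, main_model]
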